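-- pv_equiv track=rewrite | github.com/cirosantilli/project-euler-solvers | solvers/524.py | F_value
-- ===== SOURCE A (Python) =====
-- from typing import Optional, Tuple
--
-- class Fenwick:
--     """Fenwick tree / BIT for prefix sums over 1..n."""
--
--     __slots__ = ("n", "bit")
--
--     def __init__(self, n: int) -> None:
--         self.n = n
--         self.bit = [0] * (n + 1)
--
--     def add(self, i: int, delta: int) -> None:
--         n = self.n
--         bit = self.bit
--         while i <= n:
--             bit[i] += delta
--             i += i & -i
--
--     def sum(self, i: int) -> int:
--         s = 0
--         bit = self.bit
--         while i > 0:
--             s += bit[i]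
--             i -= i & -i
--         return s
--
-- def F_value(p: Tuple[int, ...]) -> int:
--     """
--     Closed form for F(P):
--
--     Scan left-to-right. Let M be the maximum seen so far.
--     If x is a new maximum -> contributes 0.
--     Otherwise let r = (# of earlier elements < x). Add 2^r.
--     """
--     n = len(p)
--     if n <= 1:
--         return 0
--     ft = Fenwick(n)
--     max_so_far = 0
--     f = 0
--     for x in p:
--         if x > max_so_far:
--             max_so_far = x
--         else:
--             r = ft.sum(x - 1)
--             f += 1 << r
--         ft.add(x, 1)
--     return f
-- ===== SOURCE B (Python) =====
-- def F_value(p):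
--     """
--     Same scan, no Fenwick tree: for each element x that is not a new maximum,
--     rank r is recomputed by scanning the already-seen prefix and counting the
--     earlier elements strictly smaller than x; add 1 << r.
--     """
--     n = len(p)
--     if n <= 1:
--         return 0
--     max_so_far = 0
--     f = 0
--     for i, x in enumerate(p):
--         if x > max_so_far:
--             max_so_far = x
--         else:
--             r = sum(1 for y in p[:i] if y < x)
--             f += 1 << r
--     return f
-- ===== Notes on version B (the rewrite author's own statement) =====
-- stated objective: simpler
-- what changed: Replaced the Fenwick/BIT index structure (add + prefix-sum queries) by directly rescanning the already-seen prefix and counting earlier elements strictly smaller than x, dropping the Fenwick class entirely.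
import Mathlib
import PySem

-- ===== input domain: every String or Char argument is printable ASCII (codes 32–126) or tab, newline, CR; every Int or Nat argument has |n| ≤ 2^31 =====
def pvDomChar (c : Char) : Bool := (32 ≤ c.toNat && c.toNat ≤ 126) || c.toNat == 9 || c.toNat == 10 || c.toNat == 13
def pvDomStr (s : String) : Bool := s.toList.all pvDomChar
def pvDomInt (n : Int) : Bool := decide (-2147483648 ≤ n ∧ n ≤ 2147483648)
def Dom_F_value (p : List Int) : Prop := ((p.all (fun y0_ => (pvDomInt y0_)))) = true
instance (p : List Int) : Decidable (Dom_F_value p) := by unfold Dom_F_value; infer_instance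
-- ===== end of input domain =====

-- B replaces A's Fenwick/BIT index structure by a direct rescan of the already-seen prefix (simpler,
-- no tree); proved equal on Pre_F_value, exactly the inputs where the Python A terminates normally.

-- ===== PORT A =====

-- Python's `i & -i` (lowest set bit), as A's Fenwick loops compute it
def pvLowbit (i : Int) : Int := PySem.Int.band i (-i)

-- the next three lemmas are needed by the ports' termination proofs (decreasing_by), so they stay above
theorem pvLowbit_eq_nat (m : Nat) (hm : 0 < m) :
    pvLowbit (m : Int) = ((m - (m &&& (m - 1)) : Nat) : Int) := by
  unfold pvLowbit PySem.Int.band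
  have h1 : (0:Int) ≤ (m:Int) := by positivity
  have h2 : ¬ ((0:Int) ≤ -(m:Int)) := by omega
  rw [if_pos h1, if_neg h2]
  congr 1
  have h3 : (-(-(m:Int)) - 1).toNat = m - 1 := by omega
  rw [h3, Int.toNat_natCast]

theorem pvLowbit_pos {i : Int} (h : 1 ≤ i) : 1 ≤ pvLowbit i := by
  obtain ⟨m, rfl⟩ : ∃ m : Nat, i = (m : Int) := ⟨i.toNat, by omega⟩
  have hm : 0 < m := by omega
  rw [pvLowbit_eq_nat m hm]
  have h2 : m &&& (m - 1) ≤ m - 1 := Nat.and_le_right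
  omega

theorem pvLowbit_le {i : Int} (h : 1 ≤ i) : pvLowbit i ≤ i := by
  obtain ⟨m, rfl⟩ : ∃ m : Nat, i = (m : Int) := ⟨i.toNat, by omega⟩
  have hm : 0 < m := by omega
  rw [pvLowbit_eq_nat m hm]
  have h2 : m &&& (m - 1) ≤ m - 1 := Nat.and_le_right
  omega

-- Fenwick.add: `while i <= n: bit[i] += delta; i += i & -i`.
-- The extra `1 ≤ i` in the guard is a totality guard only: for i ≤ 0 Python's loop never terminates
-- (such inputs are excluded by Pre_F_value); pyGetD/pySetD are exact for the in-range indices Pre_ admits.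
def fenAdd (n : Int) (bit : List Int) (i delta : Int) : List Int :=
  if h : 1 ≤ i ∧ i ≤ n then
    fenAdd n (PySem.List.pySetD bit i (PySem.List.pyGetD bit i 0 + delta)) (i + pvLowbit i) delta
  else bit
termination_by (n + 1 - i).toNat
decreasing_by
  have h1 := pvLowbit_pos h.1
  omega

-- Fenwick.sum: `while i > 0: s += bit[i]; i -= i & -i`
def fenSum (bit : List Int) (i : Int) : Int :=
  if h : 0 < i then PySem.List.pyGetD bit i 0 + fenSum bit (i - pvLowbit i) else 0
termination_by i.toNat
decreasing_by
  have h1 := pvLowbit_pos h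
  have h2 := pvLowbit_le h
  omega

-- loop body of A's scan; state = (max_so_far, f, ft.bit); `1 << r` is `1 <<< r.toNat` (r ≥ 0 on Pre_)
def fvStepA (n : Int) (st : Int × Int × List Int) (x : Int) : Int × Int × List Int :=
  if st.1 < x then (x, st.2.1, fenAdd n st.2.2 x 1)
  else (st.1, st.2.1 + ((1 : Int) <<< (fenSum st.2.2 (x - 1)).toNat), fenAdd n st.2.2 x 1)

def F_value (p : List Int) : Int :=
  if (p.length : Int) ≤ 1 then 0
  else (p.foldl (fvStepA (p.length : Int)) (0, 0, List.replicate (p.length + 1) 0)).2.1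

-- ===== PORT B =====

-- loop body of B's scan; state = (max_so_far, f); ix = (index, element) from enumerate;
-- `sum(1 for y in p[:i] if y < x)` is the countP over the slice p[:i]
def fvStepB (p : List Int) (st : Int × Int) (ix : Int × Int) : Int × Int :=
  if st.1 < ix.2 then (ix.2, st.2)
  else (st.1, st.2 + ((1 : Int) <<< ((PySem.List.slice p none (some ix.1)).countP (fun y => y < ix.2))))

def F_value_alt (p : List Int) : Int :=
  if (p.length : Int) ≤ 1 then 0
  else ((PySem.List.enumerate p 0).foldl (fvStepB p) (0, 0)).2

-- ===== PRECONDITION & SPEC =====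
-- Pre_F_value is exactly where the Python A terminates normally (for n ≥ 2): A's add-loop runs forever
-- on any element < 1, and A raises IndexError on an element above n+1 unless it is a strict running
-- maximum (then the Fenwick never has to rank it).  Nothing on which A returns is excluded.
def Pre_F_value (p : List Int) : Prop :=
  (p.length : Int) ≤ 1 ∨
    ∀ k < p.length, 1 ≤ p.getD k 0 ∧
      (p.getD k 0 ≤ (p.length : Int) + 1 ∨ ∀ j < k, p.getD j 0 < p.getD k 0)
instance (p : List Int) : Decidable (Pre_F_value p) := by unfold Pre_F_value; infer_instance

def pvWitness_F_value : List Int := [2, 1, 3]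

def Spec_F_value (p : List Int) (out : Int) : Prop := out = F_value_alt p
instance (p : List Int) (out : Int) : Decidable (Spec_F_value p out) := by unfold Spec_F_value; infer_instance

-- ===== CLAIM (what is proved, stated in full; the proofs are below) =====
def Claim_equal_F_value : Prop := ∀ (p : List Int), Dom_F_value p → Pre_F_value p → Spec_F_value p (F_value p)

-- ===== LEMMAS AND PROOFS =====

-- ---- characterising pvLowbit: i & -i = 2^(2-adic valuation of i) ----

theorem nat_and_pred_odd (c : Nat) : (2 * c + 1) &&& (2 * c) = 2 * c := by
  apply Nat.eq_of_testBit_eq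
  intro i
  cases i with
  | zero => simp [Nat.and_comm]
  | succ k =>
      rw [Nat.testBit_and, Nat.testBit_succ, Nat.testBit_succ,
        show (2 * c + 1) / 2 = c by omega, show (2 * c) / 2 = c by omega, Bool.and_self]

theorem nat_and_pred_even (x : Nat) : (2 * x) &&& (2 * x - 1) = 2 * (x &&& (x - 1)) := by
  rcases Nat.eq_zero_or_pos x with h | h
  · subst h; simp
  apply Nat.eq_of_testBit_eq
  intro i
  cases i with
  | zero => simp
  | succ k =>
      rw [Nat.testBit_and, Nat.testBit_succ, Nat.testBit_succ, Nat.testBit_succ,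
        show (2 * x) / 2 = x by omega, show (2 * x - 1) / 2 = x - 1 by omega,
        show (2 * (x &&& (x-1))) / 2 = x &&& (x - 1) by omega, Nat.testBit_and]

theorem lbN_pow (j a : Nat) (ha : a % 2 = 1) :
    a * 2 ^ j - (a * 2 ^ j &&& (a * 2 ^ j - 1)) = 2 ^ j := by
  induction j with
  | zero =>
      simp only [pow_zero, mul_one]
      obtain ⟨c, hc⟩ : ∃ c, a = 2 * c + 1 := ⟨a / 2, by omega⟩
      subst hc
      rw [show 2 * c + 1 - 1 = 2 * c by omega, nat_and_pred_odd]
      omega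
  | succ k ih =>
      have h : a * 2 ^ (k + 1) = 2 * (a * 2 ^ k) := by ring
      rw [h, nat_and_pred_even]
      have hle : (a * 2 ^ k) &&& (a * 2 ^ k - 1) ≤ a * 2 ^ k := Nat.and_le_left
      have h2 : (2:Nat) ^ (k+1) = 2 * 2 ^ k := by ring
      omega

theorem pvLowbit_two_pow (j : Nat) (a : Int) (ha : a % 2 = 1) (ha0 : 0 < a) :
    pvLowbit (a * 2 ^ j) = 2 ^ j := by
  obtain ⟨c, rfl⟩ : ∃ c : Nat, a = (c : Int) := ⟨a.toNat, by omega⟩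
  have hc : c % 2 = 1 := by omega
  have hM : ((c : Int) * 2 ^ j) = ((c * 2 ^ j : Nat) : Int) := by push_cast; ring
  have hc0 : 0 < c := by omega
  have hMpos : 0 < c * 2 ^ j := by positivity
  rw [hM, pvLowbit_eq_nat _ hMpos, lbN_pow j c hc]
  push_cast; ring

theorem pvLowbit_decomp (i : Int) (hi : 0 < i) :
    ∃ (j : Nat) (a : Int), a % 2 = 1 ∧ 0 < a ∧ i = a * 2 ^ j ∧ pvLowbit i = 2 ^ j := by
  obtain ⟨m, rfl⟩ : ∃ m : Nat, i = (m : Int) := ⟨i.toNat, by omega⟩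
  have hm : m ≠ 0 := by omega
  obtain ⟨k, c, hodd, hc⟩ := Nat.exists_eq_two_pow_mul_odd hm
  have hcodd : c % 2 = 1 := by obtain ⟨d, hd⟩ := hodd; omega
  have hc0 : 0 < c := by omega
  refine ⟨k, (c : Int), by exact_mod_cast hcodd, by exact_mod_cast hc0, ?_, ?_⟩
  · rw [hc]; push_cast; ring
  · rw [hc, show ((2 ^ k * c : Nat) : Int) = (c : Int) * 2 ^ k by push_cast; ring]
    exact pvLowbit_two_pow k (c : Int) (by exact_mod_cast hcodd) (by exact_mod_cast hc0)

-- ---- the two interval facts behind Fenwick-path membership ----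

theorem lb_step_fwd (y i : Int) (hy : 1 ≤ y) (hi : 1 ≤ i)
    (h1 : i - pvLowbit i < y) (h2 : y ≤ i) (hne : y ≠ i) :
    i - pvLowbit i < y + pvLowbit y ∧ y + pvLowbit y ≤ i := by
  obtain ⟨j, a, haodd, ha0, hia, hlbi⟩ := pvLowbit_decomp i (by omega)
  obtain ⟨e, he⟩ : ∃ e : Int, a = 2 * e + 1 := ⟨(a-1)/2, by omega⟩
  set t : Int := y - (i - 2 ^ j) with ht
  have hlbt0 : 0 < t := by omega
  obtain ⟨l, c, hcodd, hc0, htc, hlbt⟩ := pvLowbit_decomp t hlbt0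
  have htlt : t < 2 ^ j := by omega
  have hlj : l < j := by
    by_contra hlj
    push_neg at hlj
    have h1' : (2:Int) ^ j ≤ 2 ^ l := pow_le_pow_right₀ (by norm_num) hlj
    have h2l : (2:Int) ^ l ≤ c * 2 ^ l := le_mul_of_one_le_left (by positivity) (by omega)
    omega
  have hsplit : (2:Int) ^ j = 2 ^ (j - l) * 2 ^ l := by
    rw [← pow_add]; congr 1; omega
  have hycoef : y = ((a - 1) * 2 ^ (j - l) + c) * 2 ^ l := by
    have hyt : y = (i - 2 ^ j) + t := by omega
    rw [hyt, hia, htc, hsplit]; ring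
  obtain ⟨d, hd⟩ : ∃ d : Nat, j - l = d + 1 := ⟨j - l - 1, by omega⟩
  have hcoefodd : ((a - 1) * 2 ^ (j - l) + c) % 2 = 1 := by
    have hC : (a - 1) * 2 ^ (j - l) + c = 2 * (e * 2 ^ (j - l)) + c := by rw [he]; ring
    rw [hC]; omega
  have h2l : (0:Int) < 2 ^ l := by positivity
  have hcoefpos : 0 < (a - 1) * 2 ^ (j - l) + c := by
    nlinarith [hycoef, hy]
  have hlby : pvLowbit y = 2 ^ l := by
    rw [hycoef]; exact pvLowbit_two_pow l _ hcoefodd hcoefpos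
  have hc1 : c + 1 ≤ 2 ^ (j - l) := by
    have hlt : c * 2 ^ l < 2 ^ (j - l) * 2 ^ l := by rw [← hsplit]; omega
    have hclt : c < 2 ^ (j - l) := lt_of_mul_lt_mul_right hlt (by positivity)
    omega
  constructor
  · omega
  · have hmul : (c + 1) * 2 ^ l ≤ 2 ^ (j - l) * 2 ^ l :=
      mul_le_mul_of_nonneg_right hc1 (by positivity)
    rw [← hsplit] at hmul
    have hexp : (c + 1) * 2 ^ l = c * 2 ^ l + 2 ^ l := by ring
    omega

theorem lb_step_bwd (y i : Int) (hy : 1 ≤ y) (hi : 1 ≤ i)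
    (h1 : i - pvLowbit i < y + pvLowbit y) (h2 : y + pvLowbit y ≤ i) :
    i - pvLowbit i < y := by
  obtain ⟨j, a, haodd, ha0, hia, hlbi⟩ := pvLowbit_decomp i (by omega)
  obtain ⟨k, b, hbodd, hb0, hyb, hlby⟩ := pvLowbit_decomp y (by omega)
  by_contra hcon
  push_neg at hcon
  rw [hlbi] at h1 hcon
  rw [hlby] at h1 h2
  obtain ⟨e, he⟩ : ∃ e : Int, a = 2 * e + 1 := ⟨(a-1)/2, by omega⟩
  obtain ⟨d, hd⟩ : ∃ d : Int, b = 2 * d + 1 := ⟨(b-1)/2, by omega⟩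
  have hM : i - 2 ^ j = e * 2 ^ (j + 1) := by rw [hia, he]; ring
  have hY : y + 2 ^ k = (d + 1) * 2 ^ (k + 1) := by rw [hyb, hd]; ring
  have hk1 : (0:Int) < 2 ^ k := by positivity
  rcases (by omega : k ≤ j ∨ j < k) with hkj | hjk
  · have hsplit : (2:Int) ^ (j + 1) = 2 ^ (j - k) * 2 ^ (k + 1) := by
      rw [← pow_add]; congr 1; omega
    have hE : i - 2 ^ j = (2 * (e * 2 ^ (j - k))) * 2 ^ k := by
      rw [hM, hsplit]; ring
    set E : Int := e * 2 ^ (j - k) with hEdef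
    have hlow : b * 2 ^ k ≤ 2 * E * 2 ^ k := by rw [← hE, ← hyb]; omega
    have hhigh : 2 * E * 2 ^ k < (b + 1) * 2 ^ k := by
      have hY' : y + 2 ^ k = (b + 1) * 2 ^ k := by rw [hyb]; ring
      rw [← hE, ← hY']; omega
    have hble : b ≤ 2 * E := le_of_mul_le_mul_right hlow hk1
    have hblt : 2 * E < b + 1 := lt_of_mul_lt_mul_right hhigh (le_of_lt hk1)
    omega
  · have hsplit : (2:Int) ^ (k + 1) = 2 ^ (k - j) * 2 ^ (j + 1) := by
      rw [← pow_add]; congr 1; omega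
    set r : Int := (y + 2 ^ k) - (i - 2 ^ j) with hr
    have hr0 : 0 < r := by omega
    have hrle : r ≤ 2 ^ j := by omega
    have hdvd : (2:Int) ^ (j + 1) ∣ r := by
      rw [hr, hY, hM, hsplit]
      exact ⟨(d + 1) * 2 ^ (k - j) - e, by ring⟩
    have hle := Int.le_of_dvd hr0 hdvd
    have hpj : (2:Int) ^ (j+1) = 2 * 2 ^ j := by ring
    omega

-- ---- what fenAdd and fenSum do to the cells ----

theorem fenAdd_length (n : Int) (bit : List Int) (y d : Int) :
    (fenAdd n bit y d).length = bit.length := by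
  fun_induction fenAdd with
  | case1 bit i h ih => rw [ih]; simp [PySem.List.length_pySetD]
  | case2 => rfl

theorem pyGetD_pySetD (bit : List Int) (y i v : Int) (hy : 1 ≤ y) (hi : 1 ≤ i)
    (hylen : y.toNat < bit.length) :
    PySem.List.pyGetD (PySem.List.pySetD bit y v) i 0 =
      if i = y then v else PySem.List.pyGetD bit i 0 := by
  rw [PySem.List.pySetD_of_nonneg bit v (by omega),
    PySem.List.pyGetD_of_nonneg _ _ (by omega : (0:Int) ≤ i),
    PySem.List.pyGetD_of_nonneg _ _ (by omega : (0:Int) ≤ i)]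
  by_cases h : i = y
  · subst h
    simp [List.getD, List.getElem?_set_self (by omega : i.toNat < bit.length)]
  · have hne : y.toNat ≠ i.toNat := by omega
    simp only [List.getD, List.getElem?_set_ne hne, if_neg h]

theorem fenAdd_getD (n : Int) (bit : List Int) (y d : Int) (hy : 1 ≤ y)
    (hlen : (n : Int) < (bit.length : Int)) (i : Int) (hi1 : 1 ≤ i) (hi2 : i ≤ n) :
    PySem.List.pyGetD (fenAdd n bit y d) i 0 =
      PySem.List.pyGetD bit i 0 + (if i - pvLowbit i < y ∧ y ≤ i then d else 0) := by
  fun_induction fenAdd n bit y d with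
  | case1 bit y h ih =>
      have hy' : 1 ≤ y + pvLowbit y := by have := pvLowbit_pos h.1; omega
      rw [PySem.List.length_pySetD] at ih
      rw [ih hy' hlen]
      rw [pyGetD_pySetD bit y i _ h.1 hi1 (by omega)]
      have hlb_y := pvLowbit_pos h.1
      have hlb_i := pvLowbit_pos hi1
      by_cases hiy : i = y
      · subst hiy
        rw [if_pos rfl]
        have hno : ¬ (i - pvLowbit i < i + pvLowbit i ∧ i + pvLowbit i ≤ i) := by omega
        have hyes : i - pvLowbit i < i ∧ i ≤ i := ⟨by omega, le_rfl⟩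
        rw [if_neg hno, if_pos hyes]
        ring
      · rw [if_neg hiy]
        by_cases hc : i - pvLowbit i < y ∧ y ≤ i
        · obtain ⟨hf1, hf2⟩ := lb_step_fwd y i h.1 hi1 hc.1 hc.2 (Ne.symm hiy)
          rw [if_pos hc, if_pos ⟨hf1, hf2⟩]
        · rw [if_neg hc, if_neg ?_]
          intro hc2
          exact hc ⟨lb_step_bwd y i h.1 hi1 hc2.1 hc2.2, by
            have := pvLowbit_pos h.1; omega⟩
  | case2 bit y h =>
      rw [if_neg ?_]
      · ring
      · intro hc2
        exact h ⟨hy, by omega⟩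

theorem countP_between_split (l : List Int) (a b c : Int) (hab : a ≤ b) (hbc : b ≤ c) :
    l.countP (fun y => decide (a < y ∧ y ≤ c)) =
      l.countP (fun y => decide (a < y ∧ y ≤ b)) + l.countP (fun y => decide (b < y ∧ y ≤ c)) := by
  induction l with
  | nil => rfl
  | cons x l ih =>
      simp only [List.countP_cons, ih]
      by_cases h1 : a < x ∧ x ≤ b
      · simp only [decide_eq_true_eq]
        rw [if_pos h1, if_pos ⟨h1.1, by omega⟩, if_neg (by omega)]
        omega
      · by_cases h2 : b < x ∧ x ≤ c
        · simp only [decide_eq_true_eq]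
          rw [if_pos ⟨by omega, h2.2⟩, if_neg h1, if_pos h2]
          omega
        · simp only [decide_eq_true_eq]
          rw [if_neg (by omega), if_neg h1, if_neg h2]
          omega

theorem fenSum_eq_count (n : Int) (bit seen : List Int)
    (hbit : ∀ i : Int, 1 ≤ i → i ≤ n →
      PySem.List.pyGetD bit i 0 = (seen.countP (fun y => decide (i - pvLowbit i < y ∧ y ≤ i)) : Int)) :
    ∀ q : Int, 0 ≤ q → q ≤ n →
    fenSum bit q = (seen.countP (fun y => decide (0 < y ∧ y ≤ q)) : Int) := by
  intro q
  induction q using fenSum.induct with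
  | case1 q hq ih =>
      intro hq0 hqn
      rw [fenSum, dif_pos hq]
      have hlb1 := pvLowbit_pos (by omega : (1:Int) ≤ q)
      have hlb2 := pvLowbit_le (by omega : (1:Int) ≤ q)
      rw [ih (by omega) (by omega), hbit q (by omega) hqn]
      rw [countP_between_split seen 0 (q - pvLowbit q) q (by omega) (by omega)]
      push_cast
      ring
  | case2 q hq =>
      intro hq0 hqn
      rw [fenSum, dif_neg hq]
      have hq' : q = 0 := by omega
      subst hq'
      have hfalse : (fun y : Int => decide ((0:Int) < y ∧ y ≤ 0)) = fun y : Int => false := by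
        funext y
        simp only [decide_eq_false_iff_not]
        omega
      rw [hfalse, List.countP_false]
      simp

-- ---- one add keeps the cell invariant, with the new element recorded ----

theorem hbit_update (n : Int) (bit seen : List Int) (x : Int) (hx : 1 ≤ x)
    (hlen : (n : Int) < (bit.length : Int))
    (hbit : ∀ i : Int, 1 ≤ i → i ≤ n →
      PySem.List.pyGetD bit i 0 = (seen.countP (fun y => decide (i - pvLowbit i < y ∧ y ≤ i)) : Int)) :
    ∀ i : Int, 1 ≤ i → i ≤ n →
      PySem.List.pyGetD (fenAdd n bit x 1) i 0 =
        ((seen ++ [x]).countP (fun y => decide (i - pvLowbit i < y ∧ y ≤ i)) : Int) := by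
  intro i h1 h2
  rw [fenAdd_getD n bit x 1 hx hlen i h1 h2, hbit i h1 h2, List.countP_append]
  simp only [List.countP_cons, List.countP_nil]
  by_cases h : i - pvLowbit i < x ∧ x ≤ i
  · rw [if_pos h]
    simp [h]
  · rw [if_neg h]
    simp [h]

-- ---- the scan simulation: A's fold with the Fenwick state vs B's fold with rescans ----

theorem loop_eq (p : List Int) :
    ∀ (rest seen : List Int) (m f : Int) (bit : List Int),
    p = seen ++ rest →
    (∀ k < rest.length, 1 ≤ rest.getD k 0 ∧
       (rest.getD k 0 ≤ (p.length : Int) + 1 ∨ ∀ j < seen.length + k, p.getD j 0 < rest.getD k 0)) →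
    (∀ y ∈ seen, 1 ≤ y) →
    (∀ y ∈ seen, y ≤ m) → (m = 0 ∨ m ∈ seen) → 0 ≤ m →
    bit.length = p.length + 1 →
    (∀ i : Int, 1 ≤ i → i ≤ (p.length : Int) →
      PySem.List.pyGetD bit i 0 = (seen.countP (fun y => decide (i - pvLowbit i < y ∧ y ≤ i)) : Int)) →
    (rest.foldl (fvStepA (p.length : Int)) (m, f, bit)).2.1 =
      ((PySem.List.enumerate rest (seen.length : Int)).foldl (fvStepB p) (m, f)).2 := by
  intro rest
  induction rest with
  | nil =>
      intro seen m f bit _ _ _ _ _ _ _ _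
      simp [PySem.List.enumerate_nil]
  | cons x rest' ih =>
      intro seen m f bit hp hpre hspos hub hmem hm0 hblen hbit
      have hx1 : 1 ≤ x := by
        have := (hpre 0 (by simp)).1
        simpa using this
      have hlenp : ((seen ++ [x]).length : Int) = (seen.length : Int) + 1 := by
        simp
      have hp' : p = (seen ++ [x]) ++ rest' := by rw [hp]; simp
      have hlen' : ((p.length : Int)) < ((bit.length : Int)) := by
        rw [hblen]; push_cast; omega
      have hpre' : ∀ k < rest'.length, 1 ≤ rest'.getD k 0 ∧
          (rest'.getD k 0 ≤ (p.length : Int) + 1 ∨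
            ∀ j < (seen ++ [x]).length + k, p.getD j 0 < rest'.getD k 0) := by
        intro k hk
        have hh := hpre (k + 1) (by simpa using Nat.succ_lt_succ hk)
        simp only [List.getD_cons_succ] at hh
        refine ⟨hh.1, ?_⟩
        rcases hh.2 with h | h
        · exact Or.inl h
        · right
          intro j hj
          apply h
          simp at hj ⊢
          omega
      have hbit' := hbit_update (p.length : Int) bit seen x hx1 hlen' hbit
      have hblen' : (fenAdd (p.length : Int) bit x 1).length = p.length + 1 := by
        rw [fenAdd_length, hblen]
      rw [PySem.List.enumerate_cons]
      simp only [List.foldl_cons]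
      by_cases hmx : m < x
      · -- new maximum: both sides just update max_so_far and add x to the structure
        have hA : fvStepA (p.length : Int) (m, f, bit) x = (x, f, fenAdd (p.length : Int) bit x 1) := by
          simp [fvStepA, hmx]
        have hB : fvStepB p (m, f) ((seen.length : Int), x) = (x, f) := by
          simp [fvStepB, hmx]
        rw [hA, hB]
        have hrec := ih (seen ++ [x]) x f (fenAdd (p.length : Int) bit x 1) hp' hpre'
          (by intro y hy; rcases List.mem_append.mp hy with h | h
              · exact hspos y h
              · simp at h; omega)
          (by intro y hy; rcases List.mem_append.mp hy with h | h
              · have := hub y h; omega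
              · simp at h; omega)
          (Or.inr (by simp))
          (by omega)
          hblen' hbit'
        rw [hrec, hlenp]
      · -- not a new maximum: A queries the Fenwick prefix sum, B rescans the seen prefix
        push_neg at hmx
        have hxn1 : x ≤ (p.length : Int) + 1 := by
          rcases (by simpa using (hpre 0 (by simp)).2 :
              x ≤ (p.length : Int) + 1 ∨ ∀ j < seen.length, p.getD j 0 < x) with h | h
          · exact h
          · exfalso
            rcases hmem with rfl | hmem
            · omega
            · obtain ⟨idx, hidx, heq⟩ := List.mem_iff_getElem.mp hmem
              have hgm : p.getD idx 0 = m := by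
                rw [hp]
                rw [List.getD_eq_getElem?_getD, List.getElem?_append_left (by omega),
                  List.getElem?_eq_getElem hidx]
                simpa using heq
              have := h idx hidx
              omega
        have hslice : PySem.List.slice p none (some (seen.length : Int)) = seen := by
          rw [PySem.List.slice_to_natCast, hp]
          exact List.take_left
        have hcount : (fenSum bit (x - 1)).toNat = seen.countP (fun y => y < x) := by
          rw [fenSum_eq_count (p.length : Int) bit seen hbit (x - 1) (by omega) (by omega)]
          rw [Int.toNat_natCast]
          apply List.countP_congr
          intro y hy
          have := hspos y hy
          simp only [decide_eq_true_eq]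
          omega
        have hA : fvStepA (p.length : Int) (m, f, bit) x =
            (m, f + ((1 : Int) <<< (seen.countP (fun y => y < x))), fenAdd (p.length : Int) bit x 1) := by
          simp [fvStepA, not_lt.mpr hmx, hcount]
        have hB : fvStepB p (m, f) ((seen.length : Int), x) =
            (m, f + ((1 : Int) <<< (seen.countP (fun y => y < x)))) := by
          simp [fvStepB, not_lt.mpr hmx, hslice]
        rw [hA, hB]
        have hrec := ih (seen ++ [x]) m (f + ((1 : Int) <<< (seen.countP (fun y => y < x))))
          (fenAdd (p.length : Int) bit x 1) hp' hpre'
          (by intro y hy; rcases List.mem_append.mp hy with h | h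
              · exact hspos y h
              · simp at h; omega)
          (by intro y hy; rcases List.mem_append.mp hy with h | h
              · exact hub y h
              · simp at h; omega)
          (by rcases hmem with rfl | hmem
              · exact Or.inl rfl
              · exact Or.inr (List.mem_append.mpr (Or.inl hmem)))
          hm0 hblen' hbit'
        rw [hrec, hlenp]

-- ===== VERDICT (by name: the statement is the Claim_ definition above) =====
theorem F_value_spec : Claim_equal_F_value := by
  unfold Claim_equal_F_value
  intro p _ hpre
  unfold Spec_F_value F_value F_value_alt
  by_cases h : (p.length : Int) ≤ 1
  · rw [if_pos h, if_pos h]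
  · rw [if_neg h, if_neg h]
    have hpre2 : ∀ k < p.length, 1 ≤ p.getD k 0 ∧
        (p.getD k 0 ≤ (p.length : Int) + 1 ∨ ∀ j < ([] : List Int).length + k, p.getD j 0 < p.getD k 0) := by
      rcases hpre with h1 | h2
      · exact absurd h1 h
      · intro k hk
        refine ⟨(h2 k hk).1, ?_⟩
        rcases (h2 k hk).2 with ha | hb
        · exact Or.inl ha
        · exact Or.inr (by simpa using hb)
    have hbit0 : ∀ i : Int, 1 ≤ i → i ≤ (p.length : Int) →
        PySem.List.pyGetD (List.replicate (p.length + 1) (0:Int)) i 0 =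
          (([] : List Int).countP (fun y => decide (i - pvLowbit i < y ∧ y ≤ i)) : Int) := by
      intro i h1 h2
      rw [PySem.List.pyGetD_of_nonneg _ _ (by omega : (0:Int) ≤ i)]
      simp [List.getD_eq_getElem?_getD, List.getElem?_replicate]
      split <;> rfl
    have hmain := loop_eq p p [] 0 0 (List.replicate (p.length + 1) 0)
      (by simp) hpre2 (by simp) (by simp) (Or.inl rfl) le_rfl (by simp) hbit0
    simpa using hmain
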